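-- pv_equiv track=rewrite | github.com/cavart28/PokerAI | hand.py | detect_straight
-- ===== SOURCE A (Python) =====
-- def detect_straight(hand):
--     """
--     Return the longest sequence of consecutive terms of length 5 or more. Note that it can return up to
--     seven cards in texas holdem. Also note that the highest straight out of those cards may not be the
--     one ending in the highest value, because a lower straight flush may beat it still.
--     Another caveat is that if len(hand) is L, one could get a straight of length L+1 since aces count
--     both as 1 and 14.
--
--     If no straight is detected, the function returns None.
--
--     >>> hand = [('D', 14), ('D', 4), ('H', 14), ('D', 8), ('D', 13), ('S', 4), ('D', 2)]
--     >>> detect_straight(hand)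
--
--     Otherwise the straight is returned.
--
--     >>> hand = [('S', 3), ('S', 4), ('H', 14), ('D', 5), ('H', 6), ('S', 4), ('D', 7)]
--     >>> detect_straight(hand)
--     [('S', 3), ('S', 4), ('D', 5), ('H', 6), ('D', 7)]
--
--     WARNING a straight can have more than 5 cards in this context
--
--     >>> hand = [('S', 3), ('S', 4), ('H', 8), ('D', 5), ('H', 6), ('S', 4), ('D', 7)]
--     >>> detect_straight(hand)
--     [('S', 3), ('S', 4), ('D', 5), ('H', 6), ('D', 7), ('H', 8)]
--
--     An Ace can be used as a 1 (i.e. 14 == 1)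
--
--     >>> hand = [('S', 3), ('S', 4), ('H', 2), ('D', 5), ('H', 6), ('S', 14), ('D', 7)]
--     >>> detect_straight(hand)
--     [('S', 1), ('H', 2), ('S', 3), ('S', 4), ('D', 5), ('H', 6), ('D', 7)]
--
--     """
--     ordered = sorted(hand, key=lambda x: x[1])
--
--     if ordered[-1][1] == 14:
--         ordered = [(ordered[-1][0], 1)] + ordered
--
--     previous_number = ordered[0][1]
--     straight = [ordered[0]]
--
--     for card in ordered[1:]:
--         if card[1] == previous_number + 1:
--             straight.append(card)
--         elif card[1] == previous_number:
--             continue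
--         else:
--             if len(straight) >= 5:
--                 return straight
--             straight = [card]
--         previous_number = card[1]
--
--     if len(straight) >= 5:
--         return straight
-- ===== SOURCE B (Python) =====
-- def detect_straight(hand):
--     # Index the hand by card value (first occurrence wins), tracking the max
--     # value and the last ace on the way; then detect runs of consecutive values
--     # hash-set style (walk upward from each value whose predecessor is absent)
--     # and return the lowest-starting run of length >= 5, or None.
--     first = {}
--     last_ace = None
--     mx = None
--     for card in hand:
--         first.setdefault(card[1], card)
--         if mx is None or card[1] > mx:
--             mx = card[1]
--         if card[1] == 14:
--             last_ace = card
--     if mx == 14: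
--         first[1] = (last_ace[0], 1)
--     best = None
--     for v in first:
--         if v - 1 not in first:
--             run = [first[v]]
--             w = v + 1
--             while w in first:
--                 run.append(first[w])
--                 w += 1
--             if len(run) >= 5 and (best is None or v < best[0][1]):
--                 best = run
--     return best
-- ===== Notes on version B (the rewrite author's own statement) =====
-- stated objective: alternative
-- what changed: Replaces sort-then-scan by a hash-index algorithm: one pass builds a dict from card value to its first card (tracking max value and last ace), then runs of consecutive values are detected set-style by walking upward from each value whose predecessor is absent, returning the lowest-starting run of length >= 5; no sorting at all.
import Mathlib
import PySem

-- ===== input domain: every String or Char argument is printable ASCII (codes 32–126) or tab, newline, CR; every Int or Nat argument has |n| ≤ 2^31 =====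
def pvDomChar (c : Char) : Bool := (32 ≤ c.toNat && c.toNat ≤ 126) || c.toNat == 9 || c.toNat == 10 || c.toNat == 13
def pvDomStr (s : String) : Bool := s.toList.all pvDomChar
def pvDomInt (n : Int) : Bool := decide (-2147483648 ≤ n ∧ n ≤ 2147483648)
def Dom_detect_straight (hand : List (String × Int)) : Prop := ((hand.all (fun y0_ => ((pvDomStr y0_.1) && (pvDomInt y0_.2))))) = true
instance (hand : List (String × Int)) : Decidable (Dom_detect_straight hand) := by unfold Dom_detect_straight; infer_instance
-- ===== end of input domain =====

-- B replaces A's sort-then-scan by a hash-index algorithm: one pass builds a value→first-card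
-- dict, then runs of consecutive values are found set-style by walking upward from each value
-- whose predecessor is absent; the lowest-starting run of length ≥ 5 is returned (objective: alternative).

-- ===== PORT A =====
-- the for-loop of A: state = (previous_number, straight), early return inside
def detectA_loop (prev : Int) (straight : List (String × Int)) : List (String × Int) → Option (List (String × Int))
  | [] => if 5 ≤ straight.length then some straight else none
  | card :: rest =>
    if card.2 = prev + 1 then detectA_loop card.2 (straight ++ [card]) rest
    else if card.2 = prev then detectA_loop prev straight rest
    else if 5 ≤ straight.length then some straight
    else detectA_loop card.2 [card] rest

def detect_straight (hand : List (String × Int)) : Option (List (String × Int)) :=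
  let ordered := PySem.List.sorted hand (fun c => c.2)
  match PySem.List.pyGet? ordered (-1) with
  | none => none   -- Python raises IndexError here (empty hand); excluded by Pre_
  | some last =>
    let ordered := if last.2 = 14 then (last.1, (1 : Int)) :: ordered else ordered
    match ordered with
    | [] => none   -- unreachable: ordered is nonempty whenever pyGet? succeeded
    | c0 :: rest => detectA_loop c0.2 [c0] rest

-- ===== PORT B =====
-- Source B's single observation pass: state = (first, last_ace, mx)
def bObs (st : PySem.Dict Int (String × Int) × Option (String × Int) × Option Int)
    (card : String × Int) : PySem.Dict Int (String × Int) × Option (String × Int) × Option Int :=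
  (st.1.setdefault card.2 card,
   if card.2 = 14 then some card else st.2.1,
   match st.2.2 with
   | none => some card.2
   | some m => if m < card.2 then some card.2 else some m)

-- Source B's 'while w in first' walk; the fuel only bounds the recursion (a run of
-- distinct keys is never longer than the dict), it never changes the value
def bWalk (d : PySem.Dict Int (String × Int)) (w : Int) : Nat → List (String × Int)
  | 0 => []
  | n + 1 =>
    match d.get? w with
    | some c => c :: bWalk d (w + 1) n
    | none => []

-- run = [first[v]] extended while w in first
def bRun (d : PySem.Dict Int (String × Int)) (v : Int) : List (String × Int) :=
  match d.get? v with
  | some c => c :: bWalk d (v + 1) d.size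
  | none => []   -- unreachable: v is drawn from d's keys

-- Source B's loop body over the dict's keys
def bSelStep (d : PySem.Dict Int (String × Int)) (best : Option (List (String × Int))) (v : Int) :
    Option (List (String × Int)) :=
  if d.contains (v - 1) = false then
    let run := bRun d v
    if 5 ≤ run.length then
      match best with
      | none => some run
      | some b =>
        match PySem.List.pyGet? b 0 with
        | some b0 => if v < b0.2 then some run else best
        | none => best   -- unreachable: best is always a nonempty run
    else best
  else best

def detect_straight_alt (hand : List (String × Int)) : Option (List (String × Int)) :=
  let st := hand.foldl bObs (PySem.Dict.empty, none, none)
  let d :=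
    if st.2.2 = some 14 then
      match st.2.1 with
      | some a => st.1.insert 1 (a.1, (1 : Int))
      | none => st.1   -- unreachable: last_ace exists whenever the max value is 14
    else st.1
  d.keys.foldl (bSelStep d) none

-- ===== PRECONDITION & SPEC =====
-- Pre_ excludes (i) the empty hand, on which A raises IndexError, and (ii) hands combining an
-- ace (max value 14) with a non-card value below 2: there A's ace-low duplicate is prepended in
-- front of the sorted list, out of sort order, and A's result is an accident of that scan order.
def Pre_detect_straight (hand : List (String × Int)) : Prop :=
  hand ≠ [] ∧ ((hand.map Prod.snd).max? = some 14 → ∀ c ∈ hand, 2 ≤ c.2)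
instance (hand : List (String × Int)) : Decidable (Pre_detect_straight hand) := by
  unfold Pre_detect_straight; infer_instance
def pvWitness_detect_straight : (List (String × Int)) :=
  [("S", 3), ("H", 4), ("D", 5), ("C", 6), ("S", 7), ("H", 14)]

def Spec_detect_straight (hand : List (String × Int)) (out : Option (List (String × Int))) : Prop :=
  out = detect_straight_alt hand
instance (hand : List (String × Int)) (out : Option (List (String × Int))) : Decidable (Spec_detect_straight hand out) := by
  unfold Spec_detect_straight; infer_instance

-- ===== CLAIM (what is proved, stated in full; the proofs are below) =====
def Claim_equal_detect_straight : Prop := ∀ (hand : List (String × Int)), Dom_detect_straight hand → Pre_detect_straight hand → Spec_detect_straight hand (detect_straight hand)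

-- ===== LEMMAS AND PROOFS =====

-- ---------- generic list facts ----------

lemma nodup_subset_length {l l' : List Int} (h : l.Nodup) (hs : l ⊆ l') : l.length ≤ l'.length := by
  classical
  calc l.length = l.toFinset.card := (List.toFinset_card_of_nodup h).symm
    _ ≤ l'.toFinset.card := Finset.card_le_card (by intro x hx; simp at hx ⊢; exact hs hx)
    _ ≤ l'.length := l'.toFinset_card_le

lemma getLast?_cons_or (a : String × Int) (l : List (String × Int)) :
    (a :: l).getLast? = l.getLast?.or (some a) := by
  cases l with
  | nil => simp
  | cons y ys =>
    rw [List.getLast?_cons_cons]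
    rcases hz : (y :: ys).getLast? with _ | z
    · simp at hz
    · simp [Option.some_or]

lemma getLast?_filter (p : (String × Int) → Bool) :
    ∀ (l : List (String × Int)) (c : String × Int), l.getLast? = some c → p c = true →
      (l.filter p).getLast? = some c := by
  intro l
  induction l with
  | nil => intro c h _; simp at h
  | cons x xs ih =>
    intro c h hp
    rcases xs with _ | ⟨y, ys⟩
    · have hx : x = c := by simpa using h
      subst hx
      simp [List.filter_cons, hp]
    · rw [List.getLast?_cons_cons] at h
      have hxs := ih c h hp
      have hne : List.filter p (y :: ys) ≠ [] := by
        intro hnil; rw [hnil] at hxs; simp at hxs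
      by_cases hx : p x
      · rw [List.filter_cons_of_pos hx,
          show x :: List.filter p (y :: ys) = [x] ++ List.filter p (y :: ys) from rfl,
          List.getLast?_append_of_ne_nil _ hne]
        exact hxs
      · rw [List.filter_cons_of_neg (by simpa using hx)]
        exact hxs

lemma pairwise_le_getLast {R : (String × Int) → (String × Int) → Prop} :
    ∀ (l : List (String × Int)) (c : String × Int), l.Pairwise R → l.getLast? = some c →
      ∀ x ∈ l, x = c ∨ R x c := by
  intro l
  induction l with
  | nil => intro c _ h; simp at h
  | cons x xs ih =>
    intro c hpw hlast x' hx'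
    rcases xs with _ | ⟨y, ys⟩
    · have hxc : x = c := by simpa using hlast
      have : x' = x := by simpa using hx'
      exact Or.inl (this.trans hxc)
    · rw [List.getLast?_cons_cons] at hlast
      rcases List.mem_cons.mp hx' with rfl | hmem
      · have hc : c ∈ y :: ys := List.mem_of_getLast? hlast
        exact Or.inr ((List.pairwise_cons.mp hpw).1 c hc)
      · exact ih c (List.pairwise_cons.mp hpw).2 hlast x' hmem

lemma filter_head?_isSome (v : Int) (l : List (String × Int)) :
    ((l.filter (fun c => c.2 == v)).head?).isSome = true ↔ v ∈ l.map Prod.snd := by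
  constructor
  · intro h
    rcases hl : l.filter (fun c => c.2 == v) with _ | ⟨a, t⟩
    · rw [hl] at h; simp at h
    · have ha : a ∈ l.filter (fun c => c.2 == v) := by rw [hl]; simp
      rw [List.mem_filter] at ha
      exact List.mem_map.mpr ⟨a, ha.1, by simpa using ha.2⟩
  · intro h
    rcases List.mem_map.mp h with ⟨c, hc, hcv⟩
    rcases hl : l.filter (fun c => c.2 == v) with _ | ⟨a, t⟩
    · rw [List.filter_eq_nil_iff] at hl
      exact absurd (by simpa using hcv) (by simpa using hl c hc)
    · simp [hl]

-- ---------- stability of the sort (per value class) ----------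

lemma filter_insertBy (x : String × Int) (v : Int) :
    ∀ (acc : List (String × Int)), acc.Pairwise (fun a b => a.2 ≤ b.2) →
      (PySem.List.insertBy (fun a b => decide (a.2 < b.2)) x acc).filter (fun c => c.2 == v)
        = acc.filter (fun c => c.2 == v) ++ (if x.2 == v then [x] else []) := by
  intro acc
  induction acc with
  | nil =>
    intro _
    by_cases hx : x.2 = v <;> simp [PySem.List.insertBy, List.filter_cons, hx]
  | cons y ys ih =>
    intro hpw
    have hstep : PySem.List.insertBy (fun a b => decide (a.2 < b.2)) x (y :: ys)
        = if x.2 < y.2 then x :: y :: ys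
          else y :: PySem.List.insertBy (fun a b => decide (a.2 < b.2)) x ys := by
      simp [PySem.List.insertBy]
    rw [hstep]
    by_cases hxy : x.2 < y.2
    · rw [if_pos hxy]
      by_cases hxv : x.2 = v
      · have hnil : (y :: ys).filter (fun c => c.2 == v) = [] := by
          rw [List.filter_eq_nil_iff]
          intro c hc
        -- every value in y :: ys is ≥ y.2 > x.2 = v
          have hyc : y.2 ≤ c.2 := by
            rcases List.mem_cons.mp hc with rfl | hmem
            · exact le_refl _
            · exact (List.pairwise_cons.mp hpw).1 c hmem
          simp only [beq_iff_eq]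
          omega
        rw [List.filter_cons_of_pos (by simpa using hxv), hnil]
        simp [hxv]
      · simp only [List.filter_cons, beq_iff_eq, hxv, decide_false, cond_false]
        simp [hxv]
    · rw [if_neg hxy]
      have ihh := ih (List.pairwise_cons.mp hpw).2
      simp only [List.filter_cons]
      by_cases hyv : y.2 = v <;> simp [hyv, ihh, List.append_assoc]

lemma stab_filter (hand : List (String × Int)) (v : Int) :
    (PySem.List.sorted hand (fun c => c.2)).filter (fun c => c.2 == v)
      = hand.filter (fun c => c.2 == v) := by
  induction hand using List.reverseRecOn with
  | nil => simp [PySem.List.sorted_eq_foldl_insertBy]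
  | append_singleton l x ih =>
    rw [PySem.List.sorted_eq_foldl_insertBy, List.foldl_append, List.foldl_cons, List.foldl_nil,
      ← PySem.List.sorted_eq_foldl_insertBy]
    rw [filter_insertBy x v _ (PySem.List.sorted_pairwise l (fun c => c.2))]
    rw [ih, List.filter_append]
    congr 1
    by_cases hx : x.2 = v <;> simp [List.filter_cons, hx]

-- ---------- the observation pass of B, component by component ----------

lemma bObs_fst : ∀ (l : List (String × Int)) st,
    (l.foldl bObs st).1 = l.foldl (fun d c => d.setdefault c.2 c) st.1 := by
  intro l
  induction l with
  | nil => intro st; rfl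
  | cons c l ih => intro st; rw [List.foldl_cons, List.foldl_cons, ih]; rfl

lemma bObs_la : ∀ (l : List (String × Int)) st,
    (l.foldl bObs st).2.1 = ((l.filter (fun c => c.2 == 14)).getLast?).or st.2.1 := by
  intro l
  induction l with
  | nil => intro st; simp
  | cons c l ih =>
    intro st
    rw [List.foldl_cons, ih]
    by_cases hc : c.2 = 14
    · rw [List.filter_cons_of_pos (by simpa using hc), getLast?_cons_or, Option.or_assoc]
      have : (bObs st c).2.1 = some c := by simp [bObs, hc]
      rw [this, Option.some_or]
    · rw [List.filter_cons_of_neg (by simpa using hc)]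
      have : (bObs st c).2.1 = st.2.1 := by simp [bObs, hc]
      rw [this]

def mstep (a : Int) (c : String × Int) : Int := if a < c.2 then c.2 else a

lemma bObs_mx_some : ∀ (l : List (String × Int)) (d la m),
    (l.foldl bObs (d, la, some m)).2.2 = some (l.foldl mstep m) := by
  intro l
  induction l with
  | nil => intro d la m; rfl
  | cons c l ih =>
    intro d la m
    rw [List.foldl_cons, List.foldl_cons]
    have : bObs (d, la, some m) c
        = (d.setdefault c.2 c, (if c.2 = 14 then some c else la), some (mstep m c)) := by
      simp only [bObs, mstep]
      split_ifs <;> rfl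
    rw [this, ih]

lemma foldl_mstep_mem : ∀ (l : List (String × Int)) (m : Int),
    l.foldl mstep m = m ∨ l.foldl mstep m ∈ l.map Prod.snd := by
  intro l
  induction l with
  | nil => intro m; exact Or.inl rfl
  | cons c l ih =>
    intro m
    rw [List.foldl_cons]
    rcases ih (mstep m c) with h | h
    · rw [h]
      unfold mstep
      split_ifs
      · exact Or.inr (by simp)
      · exact Or.inl rfl
    · exact Or.inr (by simp only [List.map_cons, List.mem_cons]; exact Or.inr h)

lemma foldl_mstep_le : ∀ (l : List (String × Int)) (m : Int),
    m ≤ l.foldl mstep m ∧ ∀ c ∈ l, c.2 ≤ l.foldl mstep m := by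
  intro l
  induction l with
  | nil => intro m; exact ⟨le_refl _, by simp⟩
  | cons c l ih =>
    intro m
    rw [List.foldl_cons]
    obtain ⟨h1, h2⟩ := ih (mstep m c)
    have hm : m ≤ mstep m c := by unfold mstep; split_ifs with h <;> omega
    have hc : c.2 ≤ mstep m c := by unfold mstep; split_ifs with h <;> omega
    refine ⟨le_trans hm h1, ?_⟩
    intro x hx
    rcases List.mem_cons.mp hx with rfl | hmem
    · exact le_trans hc h1
    · exact h2 x hmem

lemma sd_get? : ∀ (l : List (String × Int)) (d : PySem.Dict Int (String × Int)) (v : Int),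
    (l.foldl (fun d c => d.setdefault c.2 c) d).get? v
      = (d.get? v).or ((l.filter (fun c => c.2 == v)).head?) := by
  intro l
  induction l with
  | nil => intro d v; simp
  | cons c l ih =>
    intro d v
    rw [List.foldl_cons, ih]
    by_cases hcv : c.2 = v
    · subst hcv
      have hsd : (d.setdefault c.2 c).get? c.2 = (d.get? c.2).or (some c) := by
        rw [PySem.Dict.get?_setdefault_self]
        cases d.get? c.2 <;> rfl
      rw [hsd, List.filter_cons_of_pos (by simp), List.head?_cons, Option.or_assoc,
        Option.some_or]
    · have hsd : (d.setdefault c.2 c).get? v = d.get? v := by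
        by_cases hc : d.contains c.2 = true
        · rw [PySem.Dict.setdefault_of_contains _ _ hc]
        · rw [PySem.Dict.setdefault_of_not_contains _ _ (by simpa using hc)]
          exact PySem.Dict.get?_insert_of_ne d c (fun h => hcv h.symm)
      rw [hsd, List.filter_cons_of_neg (by simpa using hcv)]

-- ---------- ordered dedup of the scan list ----------

def dValues (p : Int) : List (String × Int) → List (String × Int)
  | [] => []
  | x :: xs => if x.2 = p then dValues p xs else x :: dValues x.2 xs

lemma dv_gt : ∀ (l : List (String × Int)) (p : Int), l.Pairwise (fun a b => a.2 ≤ b.2) →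
    (∀ c ∈ l, p ≤ c.2) → ∀ c ∈ dValues p l, p < c.2 := by
  intro l
  induction l with
  | nil => intro p _ _ c hc; simp [dValues] at hc
  | cons x xs ih =>
    intro p hpw hge c hc
    obtain ⟨hx, hpw'⟩ := List.pairwise_cons.mp hpw
    by_cases hxp : x.2 = p
    · rw [dValues, if_pos hxp] at hc
      exact ih p hpw' (fun c hcm => hge c (List.mem_cons_of_mem _ hcm)) c hc
    · rw [dValues, if_neg hxp] at hc
      have hpx : p < x.2 := lt_of_le_of_ne (hge x (by simp)) (fun h => hxp h.symm)
      rcases List.mem_cons.mp hc with rfl | hmem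
      · exact hpx
      · exact lt_trans hpx (ih x.2 hpw' hx c hmem)

lemma dv_incr : ∀ (l : List (String × Int)) (p : Int), l.Pairwise (fun a b => a.2 ≤ b.2) →
    (∀ c ∈ l, p ≤ c.2) → ((dValues p l).map Prod.snd).Pairwise (· < ·) := by
  intro l
  induction l with
  | nil => intro p _ _; simp [dValues]
  | cons x xs ih =>
    intro p hpw hge
    obtain ⟨hx, hpw'⟩ := List.pairwise_cons.mp hpw
    by_cases hxp : x.2 = p
    · rw [dValues, if_pos hxp]
      exact ih p hpw' (fun c hcm => hge c (List.mem_cons_of_mem _ hcm))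
    · rw [dValues, if_neg hxp, List.map_cons, List.pairwise_cons]
      refine ⟨?_, ih x.2 hpw' hx⟩
      intro z hz
      rcases List.mem_map.mp hz with ⟨c, hc, rfl⟩
      exact dv_gt xs x.2 hpw' hx c hc

lemma dv_mem : ∀ (l : List (String × Int)) (p : Int) (v : Int), l.Pairwise (fun a b => a.2 ≤ b.2) →
    (∀ c ∈ l, p ≤ c.2) → (v ∈ (dValues p l).map Prod.snd ↔ v ∈ l.map Prod.snd ∧ v ≠ p) := by
  intro l
  induction l with
  | nil => intro p v _ _; simp [dValues]
  | cons x xs ih =>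
    intro p v hpw hge
    obtain ⟨hx, hpw'⟩ := List.pairwise_cons.mp hpw
    by_cases hxp : x.2 = p
    · rw [dValues, if_pos hxp]
      rw [ih p v hpw' (fun c hcm => hge c (List.mem_cons_of_mem _ hcm))]
      constructor
      · rintro ⟨hm, hne⟩; exact ⟨by simp [hm], hne⟩
      · rintro ⟨hm, hne⟩
        rcases List.mem_map.mp hm with ⟨c, hc, rfl⟩
        rcases List.mem_cons.mp hc with rfl | hmem
        · exact absurd hxp hne
        · exact ⟨List.mem_map.mpr ⟨c, hmem, rfl⟩, hne⟩
    · rw [dValues, if_neg hxp]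
      have hpx : p < x.2 := lt_of_le_of_ne (hge x (by simp)) (fun h => hxp h.symm)
      rw [List.map_cons, List.mem_cons, ih x.2 v hpw' hx]
      constructor
      · rintro (rfl | ⟨hm, hne⟩)
        · exact ⟨by simp, hxp⟩
        · rcases List.mem_map.mp hm with ⟨c, hc, rfl⟩
          have := hx c hc
          exact ⟨List.mem_map.mpr ⟨c, List.mem_cons_of_mem _ hc, rfl⟩, by omega⟩
      · rintro ⟨hm, hne⟩
        rcases List.mem_map.mp hm with ⟨c, hc, rfl⟩
        rcases List.mem_cons.mp hc with rfl | hmem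
        · exact Or.inl rfl
        · by_cases hcx : c.2 = x.2
          · exact Or.inl hcx
          · exact Or.inr ⟨List.mem_map.mpr ⟨c, hmem, rfl⟩, hcx⟩

lemma dv_first : ∀ (l : List (String × Int)) (p : Int), l.Pairwise (fun a b => a.2 ≤ b.2) →
    (∀ c ∈ l, p ≤ c.2) → ∀ c ∈ dValues p l, (l.filter (fun x => x.2 == c.2)).head? = some c := by
  intro l
  induction l with
  | nil => intro p _ _ c hc; simp [dValues] at hc
  | cons x xs ih =>
    intro p hpw hge c hc
    obtain ⟨hx, hpw'⟩ := List.pairwise_cons.mp hpw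
    by_cases hxp : x.2 = p
    · rw [dValues, if_pos hxp] at hc
      have hgt := dv_gt xs p hpw' (fun c hcm => hge c (List.mem_cons_of_mem _ hcm)) c hc
      rw [List.filter_cons_of_neg (by simp only [beq_iff_eq]; simpa using by omega)]
      exact ih p hpw' (fun c hcm => hge c (List.mem_cons_of_mem _ hcm)) c hc
    · rw [dValues, if_neg hxp] at hc
      rcases List.mem_cons.mp hc with rfl | hmem
      · rw [List.filter_cons_of_pos (by simp)]
        rfl
      · have hgt := dv_gt xs x.2 hpw' hx c hmem
        rw [List.filter_cons_of_neg (by simp only [beq_iff_eq]; simpa using by omega)]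
        exact ih x.2 hpw' hx c hmem

-- A's loop ignores duplicate values: it may run on the deduplicated list instead
lemma skip_free (l : List (String × Int)) :
    ∀ (prev : Int) (S : List (String × Int)),
      detectA_loop prev S l = detectA_loop prev S (dValues prev l) := by
  induction l with
  | nil => intro prev S; simp [dValues]
  | cons x xs ih =>
    intro prev S
    by_cases h1 : x.2 = prev + 1
    · have h2 : x.2 ≠ prev := by omega
      simp only [dValues, if_neg h2, detectA_loop, if_pos h1]
      exact ih x.2 (S ++ [x])
    · by_cases h2 : x.2 = prev
      · simp only [dValues, detectA_loop, if_neg h1, if_pos h2]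
        exact ih prev S
      · simp only [dValues, if_neg h2, detectA_loop, if_neg h1]
        by_cases hlen : 5 ≤ S.length
        · simp [hlen]
        · simp only [hlen, if_false]
          exact ih x.2 [x]

-- ---------- consecutive runs ----------

def Consec (s : Int) : List (String × Int) → Prop
  | [] => True
  | c :: cs => c.2 = s ∧ Consec (s + 1) cs

lemma consec_snoc : ∀ (S : List (String × Int)) (s : Int) (c : String × Int),
    Consec s S → c.2 = s + S.length → Consec s (S ++ [c]) := by
  intro S
  induction S with
  | nil => intro s c _ hlen; exact ⟨by simpa using hlen, trivial⟩
  | cons a S' ih =>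
    intro s c hcs hlen
    obtain ⟨ha, hcs'⟩ := hcs
    refine ⟨ha, ih (s + 1) c hcs' ?_⟩
    simp only [List.length_cons] at hlen
    push_cast at hlen ⊢
    omega

lemma consec_mem : ∀ (S : List (String × Int)) (s : Int), Consec s S →
    ∀ c ∈ S, s ≤ c.2 ∧ c.2 < s + S.length := by
  intro S
  induction S with
  | nil => intro s _ c hc; simp at hc
  | cons a S' ih =>
    intro s hcs c hc
    obtain ⟨ha, hcs'⟩ := hcs
    rcases List.mem_cons.mp hc with rfl | hmem
    · simp only [List.length_cons]
      push_cast
      omega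
    · have := ih (s + 1) hcs' c hmem
      simp only [List.length_cons]
      push_cast at this ⊢
      omega

lemma consec_mem_val : ∀ (S : List (String × Int)) (s v : Int), Consec s S →
    s ≤ v → v < s + S.length → v ∈ S.map Prod.snd := by
  intro S
  induction S with
  | nil => intro s v _ h1 h2; simp at h2; omega
  | cons a S' ih =>
    intro s v hcs h1 h2
    obtain ⟨ha, hcs'⟩ := hcs
    by_cases hv : v = s
    · exact List.mem_map.mpr ⟨a, by simp, by omega⟩
    · have : v ∈ S'.map Prod.snd := by
        apply ih (s + 1) v hcs' (by omega)
        simp only [List.length_cons] at h2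
        push_cast at h2 ⊢
        omega
      simp only [List.map_cons, List.mem_cons]
      exact Or.inr this

lemma consec_nodup : ∀ (S : List (String × Int)) (s : Int), Consec s S →
    (S.map Prod.snd).Nodup := by
  intro S
  induction S with
  | nil => intro s _; simp
  | cons a S' ih =>
    intro s hcs
    obtain ⟨ha, hcs'⟩ := hcs
    rw [List.map_cons, List.nodup_cons]
    refine ⟨?_, ih (s + 1) hcs'⟩
    intro hmem
    rcases List.mem_map.mp hmem with ⟨c, hc, hcv⟩
    have := consec_mem S' (s + 1) hcs' c hc
    omega

-- ---------- walks in the dict ----------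

lemma run_le_size (d : PySem.Dict Int (String × Int)) :
    ∀ (S : List (String × Int)) (s : Int), Consec s S → (∀ c ∈ S, d.get? c.2 = some c) →
      S.length ≤ d.size := by
  intro S s hcs hg
  have hnd : (S.map Prod.snd).Nodup := consec_nodup S s hcs
  have hsub : S.map Prod.snd ⊆ d.keys := by
    intro v hv
    rcases List.mem_map.mp hv with ⟨c, hc, rfl⟩
    rw [← PySem.Dict.contains_iff_mem_keys, PySem.Dict.contains_eq_isSome_get?, hg c hc]
    rfl
  have := nodup_subset_length hnd hsub
  have hk : d.keys.length = d.size := by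
    simp [PySem.Dict.keys, PySem.Dict.size]
  rw [List.length_map] at this
  omega

lemma walk_eq (d : PySem.Dict Int (String × Int)) :
    ∀ (S : List (String × Int)) (s : Int) (n : Nat), Consec s S →
      (∀ c ∈ S, d.get? c.2 = some c) → d.get? (s + S.length) = none → S.length ≤ n →
      bWalk d s n = S := by
  intro S
  induction S with
  | nil =>
    intro s n _ _ hend _
    simp only [List.length_nil, Nat.cast_zero, add_zero] at hend
    cases n with
    | zero => rfl
    | succ n => simp [bWalk, hend]
  | cons c S' ih =>
    intro s n hcs hg hend hlen
    obtain ⟨hcv, hcs'⟩ := hcs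
    cases n with
    | zero => simp at hlen
    | succ n =>
      have hgc : d.get? s = some c := by rw [← hcv]; exact hg c (by simp)
      simp only [bWalk, hgc]
      congr 1
      apply ih (s + 1) n hcs' (fun x hx => hg x (List.mem_cons_of_mem _ hx))
      · rw [← hend]; congr 1; simp only [List.length_cons]; push_cast; ring
      · simp only [List.length_cons] at hlen; omega

lemma bRun_eq (d : PySem.Dict Int (String × Int)) (S : List (String × Int)) (s : Int)
    (hne : S ≠ []) (hc : Consec s S) (hg : ∀ c ∈ S, d.get? c.2 = some c)
    (hend : d.get? (s + S.length) = none) : bRun d s = S := by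
  rcases S with _ | ⟨c, S'⟩
  · exact absurd rfl hne
  · obtain ⟨hcv, hcs'⟩ := hc
    have hgc : d.get? s = some c := by rw [← hcv]; exact hg c (by simp)
    have hsz : (c :: S').length ≤ d.size := run_le_size d (c :: S') s ⟨hcv, hcs'⟩ hg
    simp only [bRun, hgc]
    congr 1
    apply walk_eq d S' (s + 1) d.size hcs' (fun x hx => hg x (List.mem_cons_of_mem _ hx))
    · rw [← hend]; congr 1; simp only [List.length_cons]; push_cast; ring
    · simp only [List.length_cons] at hsz; omega

lemma bRun_empty (d : PySem.Dict Int (String × Int)) (v : Int) (h : d.contains v = false) :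
    bRun d v = [] := by
  rcases hg : d.get? v with _ | c
  · simp [bRun, hg]
  · rw [PySem.Dict.contains_eq_isSome_get?, hg] at h
    simp at h

-- ---------- result specification shared by the two algorithms ----------

def Qual (d : PySem.Dict Int (String × Int)) (v : Int) : Prop :=
  d.contains (v - 1) = false ∧ 5 ≤ (bRun d v).length

def ResSpec (d : PySem.Dict Int (String × Int)) (s : Int) (r : Option (List (String × Int))) : Prop :=
  (r = none ∧ ∀ v, s ≤ v → ¬ Qual d v) ∨
  (∃ v, s ≤ v ∧ Qual d v ∧ (∀ w, s ≤ w → Qual d w → v ≤ w) ∧ r = some (bRun d v))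

def ResSpecAll (d : PySem.Dict Int (String × Int)) (r : Option (List (String × Int))) : Prop :=
  (r = none ∧ ∀ v, ¬ Qual d v) ∨
  (∃ v, Qual d v ∧ (∀ w, Qual d w → v ≤ w) ∧ r = some (bRun d v))

lemma resspec_unique (d : PySem.Dict Int (String × Int)) (s : Int)
    (r1 r2 : Option (List (String × Int))) (h1 : ResSpec d s r1) (h2 : ResSpecAll d r2)
    (hside : ∀ v, Qual d v → s ≤ v) : r1 = r2 := by
  rcases h1 with ⟨hn1, hq1⟩ | ⟨v1, hs1, hq1, hmin1, hr1⟩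
  · rcases h2 with ⟨hn2, _⟩ | ⟨v2, hq2, _, _⟩
    · rw [hn1, hn2]
    · exact absurd hq2 (hq1 v2 (hside v2 hq2))
  · rcases h2 with ⟨_, hq2⟩ | ⟨v2, hq2, hmin2, hr2⟩
    · exact absurd hq1 (hq2 v1)
    · have hv : v1 = v2 :=
        le_antisymm (hmin1 v2 (hside v2 hq2) hq2) (hmin2 v1 hq1)
      rw [hr1, hr2, hv]

-- ---------- A's loop satisfies the specification ----------

lemma get?_none_of_contains (d : PySem.Dict Int (String × Int)) (v : Int)
    (h : d.contains v = false) : d.get? v = none := by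
  rcases hg : d.get? v with _ | c
  · rfl
  · rw [PySem.Dict.contains_eq_isSome_get?, hg] at h
    simp at h

lemma detectA_main (d : PySem.Dict Int (String × Int)) :
    ∀ (D : List (String × Int)) (S : List (String × Int)) (s : Int),
      S ≠ [] → Consec s S →
      (((S ++ D).map Prod.snd).Pairwise (· < ·)) →
      (∀ c ∈ S ++ D, d.get? c.2 = some c) →
      (∀ v : Int, s ≤ v → (d.contains v = true ↔ v ∈ (S ++ D).map Prod.snd)) →
      d.contains (s - 1) = false →
      ResSpec d s (detectA_loop (s + S.length - 1) S D) := by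
  intro D
  induction D with
  | nil =>
    intro S s hne hcons hinc hget hmem h5
    have hSmem : ∀ c ∈ S, s ≤ c.2 ∧ c.2 < s + S.length := consec_mem S s hcons
    have hend : d.get? (s + S.length) = none := by
      apply get?_none_of_contains
      rcases hcontains : d.contains (s + (S.length : Int)) with _ | _
      · rfl
      · exfalso
        have := (hmem (s + S.length) (by omega)).mp hcontains
        rw [List.append_nil] at this
        rcases List.mem_map.mp this with ⟨c, hc, hcv⟩
        have := hSmem c hc
        omega
    have hrun : bRun d s = S :=
      bRun_eq d S s hne hcons (fun c hc => hget c (by simpa using hc)) hend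
    show ResSpec d s (if 5 ≤ S.length then some S else none)
    by_cases hlen : 5 ≤ S.length
    · rw [if_pos hlen]
      exact Or.inr ⟨s, le_refl s, ⟨h5, by rw [hrun]; exact hlen⟩,
        fun w hw _ => hw, by rw [hrun]⟩
    · rw [if_neg hlen]
      refine Or.inl ⟨rfl, ?_⟩
      rintro v hv ⟨hq1, hq2⟩
      by_cases hvs : v = s
      · rw [hvs, hrun] at hq2; omega
      · by_cases hvS : v < s + S.length
        · -- v - 1 is a value of S, so Qual's first conjunct fails
          have : v - 1 ∈ (S ++ ([] : List (String × Int))).map Prod.snd := by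
            rw [List.append_nil]
            exact consec_mem_val S s (v - 1) hcons (by omega) (by omega)
          have := (hmem (v - 1) (by omega)).mpr this
          rw [this] at hq1
          exact absurd hq1 (by simp)
        · -- v is past the run: not a key at all
          have hcf : d.contains v = false := by
            rcases hcontains : d.contains v with _ | _
            · rfl
            · exfalso
              have := (hmem v hv).mp hcontains
              rw [List.append_nil] at this
              rcases List.mem_map.mp this with ⟨c, hc, hcv⟩
              have := hSmem c hc
              omega
          rw [bRun_empty d v hcf] at hq2
          simp at hq2
  | cons c D' ih =>
    intro S s hne hcons hinc hget hmem h5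
    have hSmem : ∀ x ∈ S, s ≤ x.2 ∧ x.2 < s + S.length := consec_mem S s hcons
    -- decompose the strict ordering across the append
    rw [List.map_append, List.pairwise_append] at hinc
    obtain ⟨pw1, pw2, hcross⟩ := hinc
    have hD'gt : ∀ y ∈ D'.map Prod.snd, c.2 < y := (List.pairwise_cons.mp pw2).1
    -- c's value lies beyond the run S
    have hlastmem : s + (S.length : Int) - 1 ∈ S.map Prod.snd := by
      apply consec_mem_val S s _ hcons
      · have := List.length_pos_of_ne_nil hne; omega
      · omega
    have hc2 : s + (S.length : Int) ≤ c.2 := by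
      have := hcross _ hlastmem c.2 (by simp)
      omega
    by_cases hext : c.2 = s + (S.length : Int)
    · -- the run extends by c
      rw [show detectA_loop (s + S.length - 1) S (c :: D')
            = detectA_loop c.2 (S ++ [c]) D' from by
        simp [detectA_loop, show c.2 = s + (S.length : Int) - 1 + 1 by omega]]
      have hlen' : c.2 = s + ((S ++ [c]).length : Int) - 1 := by
        simp only [List.length_append, List.length_cons, List.length_nil]
        push_cast
        omega
      rw [hlen']
      have happ : (S ++ [c]) ++ D' = S ++ (c :: D') := by simp
      apply ih (S ++ [c]) s (by simp) (consec_snoc S s c hcons hext)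
      · rw [happ, List.map_append, List.pairwise_append]
        exact ⟨pw1, pw2, hcross⟩
      · rw [happ]; exact hget
      · intro v hv; rw [happ]; exact hmem v hv
      · exact h5
    · -- gap: the run S breaks at c
      have hgt : s + (S.length : Int) < c.2 := by omega
      rw [show detectA_loop (s + S.length - 1) S (c :: D')
            = if 5 ≤ S.length then some S else detectA_loop c.2 [c] D' from by
        have hx1 : ¬(c.2 = s + (S.length : Int) - 1 + 1) := by omega
        have hx1' : ¬(c.2 = s + (S.length : Int)) := by omega
        have hx2 : ¬(c.2 = s + (S.length : Int) - 1) := by omega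
        simp [detectA_loop, hx1, hx1', hx2]]
      have hnotmem : ∀ v : Int, s + (S.length : Int) ≤ v → v < c.2 →
          v ∉ (S ++ c :: D').map Prod.snd := by
        intro v hv1 hv2 hm
        rw [List.map_append, List.mem_append] at hm
        rcases hm with hm | hm
        · rcases List.mem_map.mp hm with ⟨x, hx, hxv⟩
          have := hSmem x hx
          omega
        · rcases List.mem_cons.mp hm with heq | hm
          · omega
          · have := hD'gt v hm
            omega
      have hcf : ∀ v : Int, s + (S.length : Int) ≤ v → v < c.2 → d.contains v = false := by
        intro v hv1 hv2
        rcases hcontains : d.contains v with _ | _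
        · rfl
        · exact absurd ((hmem v (by omega)).mp hcontains) (hnotmem v hv1 hv2)
      have hend : d.get? (s + S.length) = none :=
        get?_none_of_contains _ _ (hcf _ (le_refl _) hgt)
      have hrun : bRun d s = S :=
        bRun_eq d S s hne hcons (fun x hx => hget x (by simp [hx])) hend
      by_cases hlen : 5 ≤ S.length
      · rw [if_pos hlen]
        exact Or.inr ⟨s, le_refl s, ⟨h5, by rw [hrun]; exact hlen⟩,
          fun w hw _ => hw, by rw [hrun]⟩
      · rw [if_neg hlen]
        -- no qualifying start below c.2
        have hnoq : ∀ v, s ≤ v → v < c.2 → ¬ Qual d v := by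
          rintro v hv1 hv2 ⟨hq1, hq2⟩
          by_cases hvs : v = s
          · rw [hvs, hrun] at hq2; omega
          · by_cases hvS : v < s + S.length
            · have : v - 1 ∈ (S ++ c :: D').map Prod.snd := by
                rw [List.map_append, List.mem_append]
                exact Or.inl (consec_mem_val S s (v - 1) hcons (by omega) (by omega))
              have := (hmem (v - 1) (by omega)).mpr this
              rw [this] at hq1
              exact absurd hq1 (by simp)
            · rw [bRun_empty d v (hcf v (by omega) hv2)] at hq2
              simp at hq2
        -- the tail of the scan satisfies the spec from c.2 on
        have hIH := ih [c] c.2 (by simp) ⟨rfl, trivial⟩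
          (by simpa using pw2)
          (by intro x hx; exact hget x (by simp at hx ⊢; tauto))
          (by
            intro v hv
            rw [show ([c] ++ D' : List (String × Int)) = c :: D' from rfl]
            rw [hmem v (by omega)]
            constructor
            · intro hm
              rw [List.map_append, List.mem_append] at hm
              rcases hm with hm | hm
              · rcases List.mem_map.mp hm with ⟨x, hx, hxv⟩
                have := hSmem x hx
                omega
              · exact hm
            · intro hm
              rw [List.map_append, List.mem_append]
              exact Or.inr hm)
          (by
            apply hcf
            · omega
            · omega)
        rw [show c.2 + (([c] : List (String × Int)).length : Int) - 1 = c.2 from by simp] at hIH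
        rcases hIH with ⟨hr, hq⟩ | ⟨v, hv1, hv2, hv3, hv4⟩
        · refine Or.inl ⟨hr, ?_⟩
          intro v hv
          by_cases hvc : v < c.2
          · exact hnoq v hv hvc
          · exact hq v (by omega)
        · refine Or.inr ⟨v, by omega, hv2, ?_, hv4⟩
          intro w hw hqw
          by_cases hwc : w < c.2
          · exact absurd hqw (hnoq w hw hwc)
          · exact hv3 w (by omega) hqw

-- ---------- B's fold over the keys satisfies the specification ----------

def InvB (d : PySem.Dict Int (String × Int)) (P : List Int) (r : Option (List (String × Int))) : Prop :=
  (r = none ∧ ∀ v ∈ P, ¬ Qual d v) ∨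
  (∃ v ∈ P, Qual d v ∧ (∀ w ∈ P, Qual d w → v ≤ w) ∧ r = some (bRun d v))

lemma invb_extend (d : PySem.Dict Int (String × Int)) (P : List Int)
    (r : Option (List (String × Int))) (v : Int) (h : InvB d P r) (hnq : ¬ Qual d v) :
    InvB d (P ++ [v]) r := by
  rcases h with ⟨hr, hnqP⟩ | ⟨u, huP, hqu, humin, hr⟩
  · refine Or.inl ⟨hr, ?_⟩
    intro w hw
    rcases List.mem_append.mp hw with hw | hw
    · exact hnqP w hw
    · have : w = v := by simpa using hw
      rw [this]; exact hnq
  · refine Or.inr ⟨u, List.mem_append.mpr (Or.inl huP), hqu, ?_, hr⟩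
    intro w hw hqw
    rcases List.mem_append.mp hw with hw | hw
    · exact humin w hw hqw
    · have : w = v := by simpa using hw
      rw [this] at hqw
      exact absurd hqw hnq

lemma qual_mem_keys (d : PySem.Dict Int (String × Int)) (v : Int) (hq : Qual d v) :
    v ∈ d.keys := by
  rcases hg : d.get? v with _ | c
  · exfalso
    have hlen := hq.2
    rw [show bRun d v = [] from by simp [bRun, hg]] at hlen
    simp at hlen
  · rw [← PySem.Dict.contains_iff_mem_keys, PySem.Dict.contains_eq_isSome_get?, hg]
    rfl

lemma bfold_inv (d : PySem.Dict Int (String × Int))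
    (hP4 : ∀ (v : Int) (c : String × Int), d.get? v = some c → c.2 = v) :
    ∀ (ks : List Int) (P : List Int) (r : Option (List (String × Int))),
      InvB d P r → InvB d (P ++ ks) (ks.foldl (bSelStep d) r) := by
  intro ks
  induction ks with
  | nil => intro P r h; simpa using h
  | cons v ks ih =>
    intro P r hinv
    rw [List.foldl_cons]
    have hstep : InvB d (P ++ [v]) (bSelStep d r v) := by
      by_cases hq1 : d.contains (v - 1) = false
      · by_cases hq2 : 5 ≤ (bRun d v).length
        · have hqv : Qual d v := ⟨hq1, hq2⟩
          rcases hinv with ⟨hr, hnq⟩ | ⟨u, huP, hqu, humin, hr⟩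
          · subst hr
            rw [show bSelStep d none v = some (bRun d v) from by simp [bSelStep, hq1, hq2]]
            refine Or.inr ⟨v, by simp, hqv, ?_, rfl⟩
            intro w hw hqw
            rcases List.mem_append.mp hw with hw | hw
            · exact absurd hqw (hnq w hw)
            · have : w = v := by simpa using hw
              omega
          · rcases hbu : bRun d u with _ | ⟨cu, t⟩
            · exfalso
              have hlen := hqu.2
              rw [hbu] at hlen
              simp at hlen
            · have hgu : d.get? u = some cu := by
                rcases hg : d.get? u with _ | x
                · simp [bRun, hg] at hbu
                · simp only [bRun, hg] at hbu
                  rw [← ((List.cons.injEq _ _ _ _).mp hbu).1]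
              have hcu2 : cu.2 = u := hP4 u cu hgu
              rw [hr, hbu]
              rw [show bSelStep d (some (cu :: t)) v
                    = if v < cu.2 then some (bRun d v) else some (cu :: t) from by
                simp [bSelStep, hq1, hq2, PySem.List.pyGet?, PySem.List.pyIdx?]]
              rw [hcu2]
              by_cases hvu : v < u
              · rw [if_pos hvu]
                refine Or.inr ⟨v, by simp, hqv, ?_, rfl⟩
                intro w hw hqw
                rcases List.mem_append.mp hw with hw | hw
                · have := humin w hw hqw
                  omega
                · have : w = v := by simpa using hw
                  omega
              · rw [if_neg hvu]
                refine Or.inr ⟨u, List.mem_append.mpr (Or.inl huP), hqu, ?_, by rw [hbu]⟩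
                intro w hw hqw
                rcases List.mem_append.mp hw with hw | hw
                · exact humin w hw hqw
                · have : w = v := by simpa using hw
                  omega
        · have hnq : ¬ Qual d v := fun h => hq2 h.2
          rw [show bSelStep d r v = r from by
            rcases r with _ | b <;> simp [bSelStep, hq1, hq2]]
          exact invb_extend d P r v hinv hnq
      · have hnq : ¬ Qual d v := fun h => hq1 h.1
        rw [show bSelStep d r v = r from by simp [bSelStep, hq1]]
        exact invb_extend d P r v hinv hnq
    have := ih (P ++ [v]) _ hstep
    simpa [List.append_assoc] using this

lemma bfold_spec (d : PySem.Dict Int (String × Int))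
    (hP4 : ∀ (v : Int) (c : String × Int), d.get? v = some c → c.2 = v) :
    ResSpecAll d (d.keys.foldl (bSelStep d) none) := by
  have h0 : InvB d [] none := Or.inl ⟨rfl, by simp⟩
  have h := bfold_inv d hP4 d.keys [] none h0
  rw [List.nil_append] at h
  rcases h with ⟨hr, hnq⟩ | ⟨v, hvP, hq, hmin, hr⟩
  · exact Or.inl ⟨hr, fun v hq => (hnq v (qual_mem_keys d v hq)) hq⟩
  · exact Or.inr ⟨v, hq, fun w hqw => hmin w (qual_mem_keys d w hqw) hqw, hr⟩

-- ---------- the two algorithms against a common dict/scan-list pair ----------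

lemma head?_filter_mem (p : (String × Int) → Bool) (l : List (String × Int)) (c : String × Int)
    (h : (l.filter p).head? = some c) : c ∈ l ∧ p c = true := by
  rcases hf : l.filter p with _ | ⟨a, t⟩
  · rw [hf] at h; simp at h
  · rw [hf] at h
    have hc : c = a := by simpa using h.symm
    have ha : a ∈ l.filter p := by simp [hf]
    rw [List.mem_filter] at ha
    rw [hc]
    exact ha

lemma glue (d : PySem.Dict Int (String × Int)) (seq : List (String × Int))
    (hsort : seq.Pairwise (fun a b => a.2 ≤ b.2))
    (hDS : ∀ v, d.get? v = (seq.filter (fun c => c.2 == v)).head?)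
    (c0 : String × Int) (rest : List (String × Int)) (hseq : seq = c0 :: rest) :
    detectA_loop c0.2 [c0] rest = d.keys.foldl (bSelStep d) none := by
  subst hseq
  obtain ⟨hge, hpwr⟩ := List.pairwise_cons.mp hsort
  have hP4 : ∀ (v : Int) (c : String × Int), d.get? v = some c → c.2 = v := by
    intro v c hg
    rw [hDS v] at hg
    have := (head?_filter_mem _ _ _ hg).2
    simpa using this
  have hcont : ∀ v : Int, d.contains v = true ↔ v ∈ (c0 :: rest).map Prod.snd := by
    intro v
    rw [PySem.Dict.contains_eq_isSome_get?, hDS v, ← filter_head?_isSome v (c0 :: rest)]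
  have hmin : ∀ x ∈ c0 :: rest, c0.2 ≤ x.2 := by
    intro x hx
    rcases List.mem_cons.mp hx with rfl | hx
    · exact le_refl _
    · exact hge x hx
  -- A's loop may be run on the value-deduplicated list
  rw [skip_free rest c0.2 [c0]]
  have hgt := dv_gt rest c0.2 hpwr hge
  have hA := detectA_main d (dValues c0.2 rest) [c0] c0.2 (by simp) ⟨rfl, trivial⟩
    (by
      rw [List.singleton_append, List.map_cons, List.pairwise_cons]
      refine ⟨?_, dv_incr rest c0.2 hpwr hge⟩
      intro z hz
      rcases List.mem_map.mp hz with ⟨c, hc, rfl⟩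
      exact hgt c hc)
    (by
      intro c hc
      rcases List.mem_cons.mp hc with rfl | hc
      · rw [hDS c.2, List.filter_cons_of_pos (by simp)]
        rfl
      · rw [hDS c.2, List.filter_cons_of_neg (by
          simp only [beq_iff_eq]
          have := hgt c hc
          simpa using by omega)]
        exact dv_first rest c0.2 hpwr hge c hc)
    (by
      intro v _
      rw [hcont v, List.singleton_append, List.map_cons, List.map_cons, List.mem_cons,
        List.mem_cons, dv_mem rest c0.2 v hpwr hge]
      constructor
      · rintro (rfl | hm)
        · exact Or.inl rfl
        · by_cases hvc : v = c0.2
          · exact Or.inl hvc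
          · exact Or.inr ⟨hm, hvc⟩
      · rintro (rfl | ⟨hm, _⟩)
        · exact Or.inl rfl
        · exact Or.inr hm)
    (by
      rcases hcc : d.contains (c0.2 - 1) with _ | _
      · rfl
      · exfalso
        have := (hcont _).mp hcc
        rcases List.mem_map.mp this with ⟨x, hx, hxv⟩
        have := hmin x hx
        omega)
  rw [show c0.2 + (([c0] : List (String × Int)).length : Int) - 1 = c0.2 from by simp] at hA
  have hB := bfold_spec d hP4
  apply resspec_unique d c0.2 _ _ hA hB
  intro v hq
  have hvk : d.contains v = true := by
    rcases hg : d.get? v with _ | c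
    · exfalso
      have hlen := hq.2
      rw [show bRun d v = [] from by simp [bRun, hg]] at hlen
      simp at hlen
    · rw [PySem.Dict.contains_eq_isSome_get?, hg]; rfl
  have := (hcont v).mp hvk
  rcases List.mem_map.mp this with ⟨x, hx, hxv⟩
  have := hmin x hx
  omega

-- ===== VERDICT (by name: the statement is the Claim_ definition above) =====
theorem detect_straight_spec : Claim_equal_detect_straight := by
  intro hand _ hpre
  obtain ⟨hne, hace⟩ := hpre
  unfold Spec_detect_straight detect_straight detect_straight_alt
  obtain ⟨h0, t, rfl⟩ : ∃ h0 t, hand = h0 :: t := by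
    rcases hand with _ | ⟨h0, t⟩
    · exact absurd rfl hne
    · exact ⟨h0, t, rfl⟩
  set srt := PySem.List.sorted (h0 :: t) (fun c => c.2) with hsrt
  have hsne : srt ≠ [] := by
    intro h
    have hp := PySem.List.sorted_perm (h0 :: t) (fun c => c.2) false
    rw [← hsrt, h] at hp
    exact absurd hp.symm.eq_nil (by simp)
  obtain ⟨last, hlast⟩ : ∃ a, srt.getLast? = some a := by
    cases h : srt.getLast? with
    | some a => exact ⟨a, rfl⟩
    | none => exact absurd (List.getLast?_eq_none_iff.mp h) hsne
  simp only [PySem.List.pyGet?_neg_one, hlast]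
  have hobs0 : bObs (PySem.Dict.empty, none, none) h0
      = (PySem.Dict.empty.setdefault h0.2 h0, (if h0.2 = 14 then some h0 else none), some h0.2) := by
    simp [bObs]
  set st := (h0 :: t).foldl bObs (PySem.Dict.empty, none, none) with hst
  have hmx : st.2.2 = some (t.foldl mstep h0.2) := by
    rw [hst, List.foldl_cons, hobs0, bObs_mx_some]
  set M := t.foldl mstep h0.2 with hM
  have hsp : srt.Pairwise (fun a b => a.2 ≤ b.2) := by
    simpa using PySem.List.sorted_pairwise (h0 :: t) (fun c => c.2)
  have hlastmax : ∀ x ∈ srt, x.2 ≤ last.2 := by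
    intro x hx
    rcases pairwise_le_getLast srt last hsp hlast x hx with rfl | hle
    · exact le_refl _
    · exact hle
  have hmemsrt : ∀ x : String × Int, x ∈ srt ↔ x ∈ h0 :: t := by
    intro x
    rw [hsrt]
    simp [PySem.List.mem_sorted]
  have hlem := foldl_mstep_le t h0.2
  have hMle : M ≤ last.2 := by
    rcases foldl_mstep_mem t h0.2 with h | h
    · rw [hM, h]
      exact hlastmax h0 ((hmemsrt h0).mpr (by simp))
    · rcases List.mem_map.mp h with ⟨c, hc, hcv⟩
      rw [hM, ← hcv]
      exact hlastmax c ((hmemsrt c).mpr (by simp [hc]))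
  have hlastM : last.2 ≤ M := by
    have hl : last ∈ h0 :: t := (hmemsrt last).mp (List.mem_of_getLast? hlast)
    rcases List.mem_cons.mp hl with hl0 | hl
    · rw [hl0]; exact hlem.1
    · exact hlem.2 last hl
  have hMeq : M = last.2 := le_antisymm hMle hlastM
  have hd0 : ∀ v, st.1.get? v = ((h0 :: t).filter (fun c => c.2 == v)).head? := by
    intro v
    rw [hst, bObs_fst, sd_get?]
    simp
  by_cases h14 : last.2 = 14
  · rw [if_pos h14]
    have hcond : st.2.2 = some 14 := by rw [hmx, hMeq, h14]
    rw [if_pos hcond]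
    have h2all : ∀ c ∈ h0 :: t, 2 ≤ c.2 := by
      apply hace
      rw [List.max?_eq_some_iff]
      constructor
      · exact h14 ▸ List.mem_map.mpr ⟨last, (hmemsrt last).mp (List.mem_of_getLast? hlast), rfl⟩
      · intro b hb
        rcases List.mem_map.mp hb with ⟨c, hc, rfl⟩
        have hcM : c.2 ≤ M := by
          rcases List.mem_cons.mp hc with hc0 | hc
          · rw [hc0]; exact hlem.1
          · exact hlem.2 c hc
        omega
    have hfull : ((h0 :: t).filter (fun c => c.2 == 14)).getLast? = some last := by
      rw [← stab_filter (h0 :: t) 14]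
      exact getLast?_filter _ srt last hlast (by simp [h14])
    have hla : st.2.1 = some last := by
      rw [hst, List.foldl_cons, hobs0, bObs_la]
      by_cases hh0 : h0.2 = 14
      · rw [List.filter_cons_of_pos (by simp [hh0])] at hfull
        rw [getLast?_cons_or] at hfull
        simpa [hh0] using hfull
      · rw [List.filter_cons_of_neg (by simp [hh0])] at hfull
        simpa [hh0] using hfull
    rw [hla]
    have hDS : ∀ v, (st.1.insert 1 ((last.1, (1:Int)).1, (1:Int))).get? v
        = (((last.1, (1:Int)) :: srt).filter (fun c => c.2 == v)).head? := by
      intro v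
      by_cases hv1 : v = 1
      · subst hv1
        rw [PySem.Dict.get?_insert_self]
        rw [List.filter_cons_of_pos (by simp)]
        rfl
      · rw [PySem.Dict.get?_insert_of_ne _ _ hv1]
        rw [hd0 v, ← stab_filter (h0 :: t) v]
        rw [List.filter_cons_of_neg (by simpa using fun h => hv1 h.symm)]
    have hsort : (((last.1, (1:Int)) :: srt)).Pairwise (fun a b => a.2 ≤ b.2) := by
      rw [List.pairwise_cons]
      refine ⟨?_, hsp⟩
      intro x hx
      have := h2all x ((hmemsrt x).mp hx)
      simp
      omega
    exact glue _ _ hsort hDS _ srt rfl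
  · rw [if_neg h14]
    have hcond : ¬ (st.2.2 = some 14) := by
      rw [hmx, hMeq]
      intro h
      exact h14 (by simpa using h)
    rw [if_neg hcond]
    obtain ⟨c0, rest, hsrtc⟩ : ∃ c0 rest, srt = c0 :: rest := by
      rcases hs : srt with _ | ⟨c0, rest⟩
      · exact absurd hs hsne
      · exact ⟨c0, rest, rfl⟩
    rw [hsrtc]
    have hDS : ∀ v, st.1.get? v = ((c0 :: rest).filter (fun c => c.2 == v)).head? := by
      intro v
      rw [hd0 v, ← stab_filter (h0 :: t) v, ← hsrt, hsrtc]
    exact glue _ _ (hsrtc ▸ hsp) hDS c0 rest rfl
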